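-- pv_equiv track=rewrite | github.com/abczsl520/caveman-agent | caveman/trajectory/compressor.py | merge_trajectories
-- ===== SOURCE A (Python) =====
-- def merge_trajectories(trajectories: list[list[dict]]) -> list[dict]:
--     """Merge multiple trajectory segments into one coherent conversation."""
--     merged = []
--     for traj in trajectories:
--         for turn in traj:
--             # Avoid duplicate joins
--             if merged and merged[-1].get("value") == turn.get("value"):
--                 continue
--             merged.append(turn)
--     return merged
-- ===== SOURCE B (Python) =====
-- def merge_trajectories(trajectories: list[list[dict]]) -> list[dict]:
--     """Merge multiple trajectory segments into one coherent conversation."""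
--     flat = [turn for traj in trajectories for turn in traj]
--     if not flat:
--         return []
--     # Keep the first turn, then every turn whose value differs from its stream
--     # predecessor's value (a skipped turn's value always equals the last kept
--     # value, so comparing with the predecessor is equivalent to A's check).
--     return [flat[0]] + [
--         cur for prev, cur in zip(flat, flat[1:])
--         if prev.get("value") != cur.get("value")
--     ]
-- ===== Notes on version B (the rewrite author's own statement) =====
-- stated objective: alternative
-- what changed: Replaces A's stateful loop that compares each turn with the last APPENDED turn by a stateless staged pipeline: flatten once, then filter over zip(flat, flat[1:]) keeping turns whose value differs from their stream predecessor (plus the first turn); correct because a skipped turn's value always equals the last kept value.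
import Mathlib
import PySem

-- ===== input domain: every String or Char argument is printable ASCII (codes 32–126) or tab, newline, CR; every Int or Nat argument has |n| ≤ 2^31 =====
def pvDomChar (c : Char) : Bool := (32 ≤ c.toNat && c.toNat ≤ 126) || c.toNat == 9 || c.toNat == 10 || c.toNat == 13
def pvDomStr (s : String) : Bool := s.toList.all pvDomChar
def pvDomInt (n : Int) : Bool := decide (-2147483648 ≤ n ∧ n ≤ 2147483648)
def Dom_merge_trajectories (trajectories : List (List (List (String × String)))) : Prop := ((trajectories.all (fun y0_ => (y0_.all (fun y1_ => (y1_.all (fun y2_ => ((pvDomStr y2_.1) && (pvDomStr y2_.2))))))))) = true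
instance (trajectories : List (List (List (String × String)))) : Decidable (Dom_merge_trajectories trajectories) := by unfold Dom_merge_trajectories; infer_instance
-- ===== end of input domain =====

-- B replaces A's stateful "compare with the last appended turn" loop by a stateless
-- staged pipeline: flatten, then filter over the stream zipped with its own tail
-- (keep the first turn and every turn whose value differs from its predecessor).

-- turn.get("value"): first-match lookup in the association list (dict)
def pvGetValue (t : List (String × String)) : Option String :=
  (t.find? (fun p => p.1 == "value")).map (fun p => p.2)

-- ===== PORT A =====
def merge_trajectories (trajectories : List (List (List (String × String)))) : List (List (String × String)) :=
  trajectories.foldl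
    (fun merged traj =>
      traj.foldl
        (fun merged turn =>
          match merged.getLast? with
          | some last =>
              if pvGetValue last == pvGetValue turn then merged
              else merged ++ [turn]
          | none => merged ++ [turn])
        merged)
    []

-- ===== PORT B =====
def merge_trajectories_alt (trajectories : List (List (List (String × String)))) : List (List (String × String)) :=
  let flat := trajectories.flatten
  match flat with
  | [] => []
  | first :: _ =>
      first ::
        (((flat.zip flat.tail).filter
            (fun p => !(pvGetValue p.1 == pvGetValue p.2))).map (fun p => p.2))

-- ===== PRECONDITION & SPEC =====
def Spec_merge_trajectories (trajectories : List (List (List (String × String)))) (out : List (List (String × String))) : Prop := out = merge_trajectories_alt trajectories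
instance (trajectories : List (List (List (String × String)))) (out : List (List (String × String))) : Decidable (Spec_merge_trajectories trajectories out) := by unfold Spec_merge_trajectories; infer_instance

-- ===== CLAIM (what is proved, stated in full; the proofs are below) =====
def Claim_equal_merge_trajectories : Prop := ∀ (trajectories : List (List (List (String × String)))), Dom_merge_trajectories trajectories → Spec_merge_trajectories trajectories (merge_trajectories trajectories)

-- ===== LEMMAS AND PROOFS =====

-- A's inner step, over the flattened stream
def pvStep (merged : List (List (String × String))) (turn : List (String × String)) : List (List (String × String)) :=
  match merged.getLast? with
  | some last =>
      if pvGetValue last == pvGetValue turn then merged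
      else merged ++ [turn]
  | none => merged ++ [turn]

-- the pairwise "keep if value differs from predecessor" pass, in recursive form
def pvPairs (prev : List (String × String)) : List (List (String × String)) → List (List (String × String))
  | [] => []
  | x :: xs => if pvGetValue prev == pvGetValue x then pvPairs x xs else x :: pvPairs x xs

lemma pvPairs_eq_zip (xs : List (List (String × String))) (prev : List (String × String)) :
    (((prev :: xs).zip xs).filter
        (fun p => !(pvGetValue p.1 == pvGetValue p.2))).map (fun p => p.2)
      = pvPairs prev xs := by
  induction xs generalizing prev with
  | nil => simp [pvPairs]
  | cons x xs ih =>
      rw [List.zip_cons_cons, List.filter_cons]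
      by_cases h : (pvGetValue prev == pvGetValue x) = true
      · simp only [pvPairs, h, Bool.not_true, if_pos, Bool.false_eq_true, if_false]
        exact ih x
      · simp only [pvPairs, h, Bool.not_false, Bool.false_eq_true] at *
        simp [ih x]

lemma pvStep_foldl (xs : List (List (String × String)))
    (pre : List (List (String × String))) (l prev : List (String × String))
    (h : pvGetValue l = pvGetValue prev) :
    xs.foldl pvStep (pre ++ [l]) = pre ++ [l] ++ pvPairs prev xs := by
  induction xs generalizing pre l prev with
  | nil => simp [pvPairs]
  | cons x xs ih =>
      by_cases hb : (pvGetValue prev == pvGetValue x) = true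
      · have heq : pvGetValue prev = pvGetValue x := by simpa using hb
        have hstep : pvStep (pre ++ [l]) x = pre ++ [l] := by
          have : (pvGetValue l == pvGetValue x) = true := by
            simp [h, heq]
          simp [pvStep, this]
        simp only [List.foldl_cons, hstep, pvPairs, hb, if_pos]
        exact ih pre l x (h.trans heq)
      · have hne : pvGetValue prev ≠ pvGetValue x := by simpa using hb
        have hstep : pvStep (pre ++ [l]) x = (pre ++ [l]) ++ [x] := by
          have : (pvGetValue l == pvGetValue x) = false := by
            simp [h, hne]
          simp [pvStep, this]
        simp only [List.foldl_cons, hstep, pvPairs, hb]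
        rw [ih (pre ++ [l]) x x rfl]
        simp
      
lemma merge_eq_foldl_flatten (trajectories : List (List (List (String × String)))) :
    merge_trajectories trajectories = trajectories.flatten.foldl pvStep [] := by
  unfold merge_trajectories
  rw [List.foldl_flatten]
  rfl

-- ===== VERDICT (by name: the statement is the Claim_ definition above) =====
theorem merge_trajectories_spec : Claim_equal_merge_trajectories := by
  intro trajectories _
  unfold Spec_merge_trajectories merge_trajectories_alt
  rw [merge_eq_foldl_flatten]
  cases hf : trajectories.flatten with
  | nil => simp
  | cons x xs =>
      have hstep : pvStep [] x = [x] := by simp [pvStep]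
      simp only [List.foldl_cons, hstep]
      have := pvStep_foldl xs [] x x rfl
      simpa [List.tail, pvPairs_eq_zip xs x] using this
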